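-- pv_equiv track=rewrite | github.com/pypi-data/pypi-mirror-401 | packages/pyreload-cli/pyreload_cli-1.0.1.tar.gz/pyreload_cli-1.0.1/pyreload/monitor.py | _parse_watch_path
-- ===== SOURCE A (Python) =====
-- def _parse_watch_path(path_pattern):
--     """Parse a watch path pattern into directory and file pattern.
--
--     Args:
--         path_pattern: Path pattern like 'src/*.py' or '*.py'
--
--     Returns:
--         Tuple of (directory, pattern)
--     """
--     # Check if pattern contains wildcards
--     if any(char in path_pattern for char in ["*", "?", "["]):
--         # Has wildcards - split into directory and pattern
--         if "/" in path_pattern or "\\" in path_pattern: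
--             # Has directory component
--             # Split on first non-wildcard directory separator
--             parts = path_pattern.replace("\\", "/").split("/")
--
--             # Find first part with wildcard
--             first_wildcard_idx = 0
--             for i, part in enumerate(parts):
--                 if any(char in part for char in ["*", "?", "["]):
--                     first_wildcard_idx = i
--                     break
--
--             # Directory is everything before the first wildcard
--             directory = "/".join(parts[:first_wildcard_idx]) if first_wildcard_idx > 0 else "."
--
--             # Pattern is everything from the first wildcard onwards
--             pattern = "/".join(parts[first_wildcard_idx:])
--         else:
--             # No directory, just pattern
--             directory = "."
--             pattern = path_pattern
--     else:
--         # No wildcards - treat as directory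
--         directory = path_pattern if path_pattern else "."
--         pattern = "*"
--
--     return (directory, pattern)
-- ===== SOURCE B (Python) =====
-- def _parse_watch_path(path_pattern):
--     """Parse a watch path pattern into directory and file pattern.
--
--     Single character scan: instead of splitting into segments and scanning
--     segments for the first wildcard one, walk the normalized string once,
--     remembering the last '/' seen before the first wildcard character.
--     """
--     if not any(c in "*?[" for c in path_pattern):
--         return (path_pattern if path_pattern else ".", "*")
--     if "/" not in path_pattern and "\\" not in path_pattern:
--         return (".", path_pattern)
--     s = path_pattern.replace("\\", "/")
--     cut = -1
--     for i, c in enumerate(s):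
--         if c in "*?[":
--             break
--         if c == "/":
--             cut = i
--     if cut == -1:
--         return (".", s)
--     return (s[:cut], s[cut + 1 :])
-- ===== Notes on version B (the rewrite author's own statement) =====
-- stated objective: alternative
-- what changed: The wildcard-with-separator branch replaces split-into-segments + segment loop + two joins with a single left-to-right character scan that remembers the position of the last path separator before the first wildcard character, then slices the normalized string once.
import Mathlib
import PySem

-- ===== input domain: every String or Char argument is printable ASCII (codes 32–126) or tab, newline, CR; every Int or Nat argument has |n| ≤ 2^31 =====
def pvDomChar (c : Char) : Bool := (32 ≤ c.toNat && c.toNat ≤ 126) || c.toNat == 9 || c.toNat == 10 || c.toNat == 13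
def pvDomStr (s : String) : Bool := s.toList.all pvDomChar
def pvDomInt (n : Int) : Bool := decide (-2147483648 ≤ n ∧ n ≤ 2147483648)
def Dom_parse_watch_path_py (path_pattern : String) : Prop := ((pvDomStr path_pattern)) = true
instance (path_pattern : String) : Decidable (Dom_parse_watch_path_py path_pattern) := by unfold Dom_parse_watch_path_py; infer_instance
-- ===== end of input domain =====

-- B replaces A's split-into-segments + segment loop + two joins by a single character
-- scan that remembers the last '/' before the first wildcard character (objective: alternative).

-- ===== PORT A =====
-- any(char in part for char in ["*", "?", "["])
def pvHasWildA (cs : List Char) : Bool :=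
  [['*'], ['?'], ['[']].any (fun ch => PySem.Chars.isIn ch cs)

-- the 'for i, part in enumerate(parts): if …: first_wildcard_idx = i; break' loop
def pvFirstWildLoop : List (List Char) → Nat → Nat
  | [], _ => 0
  | part :: rest, i => if pvHasWildA part then i else pvFirstWildLoop rest (i + 1)

def parse_watch_path_py (path_pattern : String) : String × String :=
  let cs := path_pattern.toList
  if pvHasWildA cs then
    if PySem.Chars.isIn ['/'] cs || PySem.Chars.isIn ['\\'] cs then
      let parts := PySem.Chars.splitOn (PySem.Chars.replace cs ['\\'] ['/']) ['/']
      let idx := pvFirstWildLoop parts 0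
      let directory := if 0 < idx then PySem.Chars.join ['/'] (parts.take idx) else ['.']
      let pattern := PySem.Chars.join ['/'] (parts.drop idx)
      (String.ofList directory, String.ofList pattern)
    else (".", path_pattern)
  else (if cs.isEmpty then "." else path_pattern, "*")

-- ===== PORT B =====
-- c in "*?["
def pvWildChar (c : Char) : Bool := PySem.Chars.isIn [c] ['*', '?', '[']

-- the 'for i, c in enumerate(s): if wild: break; if c == "/": cut = i' loop
def pvScan : List Char → Int → Int → Int
  | [], _, cut => cut
  | c :: rest, i, cut =>
    if pvWildChar c then cut
    else pvScan rest (i + 1) (if c = '/' then i else cut)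

def parse_watch_path_py_alt (path_pattern : String) : String × String :=
  let cs := path_pattern.toList
  if !(cs.any pvWildChar) then (if cs.isEmpty then "." else path_pattern, "*")
  else if !(PySem.Chars.isIn ['/'] cs) && !(PySem.Chars.isIn ['\\'] cs) then (".", path_pattern)
  else
    let s := PySem.Chars.replace cs ['\\'] ['/']
    let cut := pvScan s 0 (-1)
    if cut = -1 then (".", String.ofList s)
    else (String.ofList (PySem.Chars.slice s none (some cut)),
          String.ofList (PySem.Chars.slice s (some (cut + 1)) none))

-- ===== PRECONDITION & SPEC =====
def Spec_parse_watch_path_py (path_pattern : String) (out : String × String) : Prop := out = parse_watch_path_py_alt path_pattern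
instance (path_pattern : String) (out : String × String) : Decidable (Spec_parse_watch_path_py path_pattern out) := by unfold Spec_parse_watch_path_py; infer_instance

-- ===== CLAIM (what is proved, stated in full; the proofs are below) =====
def Claim_equal_parse_watch_path_py : Prop := ∀ (path_pattern : String), Dom_parse_watch_path_py path_pattern → Spec_parse_watch_path_py path_pattern (parse_watch_path_py path_pattern)

-- ===== LEMMAS AND PROOFS =====

-- normalization '\\' → '/' as a map
def pvNorm (c : Char) : Char := if c = '\\' then '/' else c

theorem pvReplace_go_eq (fuel : Nat) : ∀ (l acc : List Char), l.length ≤ fuel →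
    PySem.Chars.replace.go ['\\'] ['/'] fuel l acc = acc.reverse ++ l.map pvNorm := by
  induction fuel with
  | zero =>
    intro l acc h
    have : l = [] := List.eq_nil_of_length_eq_zero (Nat.le_zero.mp h)
    subst this
    simp [PySem.Chars.replace.go]
  | succ f ih =>
    intro l acc h
    cases l with
    | nil => simp [PySem.Chars.replace.go]
    | cons c t =>
      rw [PySem.Chars.replace.go]
      by_cases hc : c = '\\'
      · subst hc
        simp only [List.isPrefixOf, BEq.rfl, Bool.and_true, if_pos]
        have hd : List.drop ['\\'].length ('\\' :: t) = t := rfl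
        rw [hd, ih t _ (by simpa using h)]
        simp [pvNorm]
      · have : (['\\'].isPrefixOf (c :: t)) = false := by
          simp [List.isPrefixOf]
          exact fun h => hc h.symm
        rw [this]
        simp only [Bool.false_eq_true, if_false]
        rw [ih t _ (by simpa using h)]
        simp [pvNorm, hc]

theorem pvReplace_eq (s : List Char) :
    PySem.Chars.replace s ['\\'] ['/'] = s.map pvNorm := by
  rw [PySem.Chars.replace]
  simp only [List.isEmpty_cons, Bool.false_eq_true, if_false]
  rw [pvReplace_go_eq s.length s [] le_rfl]
  simp

theorem pvSplitOn_cons_self (c : Char) (rest : List Char) :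
    List.splitOn c (c :: rest) = [] :: List.splitOn c rest := by
  simp [List.splitOn, List.splitOnP_cons]

theorem pvSplitOn_cons_ne (c d : Char) (rest : List Char) (h : d ≠ c) :
    List.splitOn c (d :: rest) = List.modifyHead (d :: ·) (List.splitOn c rest) := by
  simp [List.splitOn, List.splitOnP_cons, h]

theorem pvSplitOn_ne_nil (c : Char) (s : List Char) : List.splitOn c s ≠ [] := by
  simp [List.splitOn]; exact List.splitOnP_ne_nil _ s

theorem pvSplitOn_go_eq (c : Char) (fuel : Nat) : ∀ (l cur : List Char) (acc : List (List Char)),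
    l.length < fuel →
    PySem.Chars.splitOn.go [c] fuel l cur acc
      = acc.reverse ++ List.modifyHead (cur.reverse ++ ·) (List.splitOn c l) := by
  induction fuel with
  | zero => intro l cur acc h; omega
  | succ f ih =>
    intro l cur acc h
    cases l with
    | nil =>
      rw [PySem.Chars.splitOn.go]
      · simp [List.splitOn]
      · omega
    | cons d t =>
      rw [PySem.Chars.splitOn.go]
      obtain ⟨h0, tl, hsplit⟩ := List.exists_cons_of_ne_nil (pvSplitOn_ne_nil c t)
      by_cases hd : d = c
      · subst hd
        simp only [List.isPrefixOf, BEq.rfl, Bool.and_true, if_pos]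
        have hdrop : List.drop [d].length (d :: t) = t := rfl
        rw [hdrop, ih t [] _ (by simpa using h), pvSplitOn_cons_self, hsplit]
        simp
      · have hpre : ([c].isPrefixOf (d :: t)) = false := by
          simp [List.isPrefixOf]
          exact fun h' => hd h'.symm
        rw [hpre]
        simp only [Bool.false_eq_true, if_false]
        rw [ih t _ _ (by simpa using h), pvSplitOn_cons_ne c d t hd, hsplit]
        simp

theorem pvSplitOn_eq (c : Char) (s : List Char) :
    PySem.Chars.splitOn s [c] = List.splitOn c s := by
  rw [PySem.Chars.splitOn, pvSplitOn_go_eq c (s.length + 1) s [] [] (by omega)]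
  obtain ⟨h0, tl, hsplit⟩ := List.exists_cons_of_ne_nil (pvSplitOn_ne_nil c s)
  rw [hsplit]
  simp

theorem pvNotMem_splitOn (c : Char) (s : List Char) : ∀ p ∈ List.splitOn c s, c ∉ p := by
  induction s with
  | nil =>
    intro p hp
    simp [List.splitOn] at hp
    subst hp; simp
  | cons d t ih =>
    intro p hp
    by_cases hd : d = c
    · subst hd
      rw [pvSplitOn_cons_self] at hp
      rcases List.mem_cons.mp hp with rfl | hp'
      · simp
      · exact ih p hp'
    · rw [pvSplitOn_cons_ne c d t hd] at hp
      obtain ⟨h0, tl, hsplit⟩ := List.exists_cons_of_ne_nil (pvSplitOn_ne_nil c t)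
      rw [hsplit] at hp
      simp only [List.modifyHead_cons] at hp
      rcases List.mem_cons.mp hp with rfl | hp'
      · intro hmem
        rcases List.mem_cons.mp hmem with hceq | hmem'
        · exact hd hceq.symm
        · exact ih h0 (by rw [hsplit]; exact List.mem_cons_self) hmem'
      · exact ih p (by rw [hsplit]; exact List.mem_cons_of_mem _ hp')

theorem pvMem_splitOn (c a : Char) (s : List Char) (ha : a ∈ s) (hne : a ≠ c) :
    ∃ p ∈ List.splitOn c s, a ∈ p := by
  induction s with
  | nil => simp at ha
  | cons d t ih =>
    by_cases hd : d = c
    · subst hd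
      have hat : a ∈ t := by
        rcases List.mem_cons.mp ha with rfl | h
        · exact absurd rfl hne
        · exact h
      obtain ⟨p, hp, hap⟩ := ih hat
      exact ⟨p, by rw [pvSplitOn_cons_self]; exact List.mem_cons_of_mem _ hp, hap⟩
    · obtain ⟨h0, tl, hsplit⟩ := List.exists_cons_of_ne_nil (pvSplitOn_ne_nil c t)
      have hform : List.splitOn c (d :: t) = (d :: h0) :: tl := by
        rw [pvSplitOn_cons_ne c d t hd, hsplit]; rfl
      rcases List.mem_cons.mp ha with rfl | hat
      · exact ⟨a :: h0, by rw [hform]; exact List.mem_cons_self, List.mem_cons_self⟩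
      · obtain ⟨p, hp, hap⟩ := ih hat
        rw [hsplit] at hp
        rcases List.mem_cons.mp hp with rfl | hp'
        · exact ⟨d :: p, by rw [hform]; exact List.mem_cons_self, List.mem_cons_of_mem _ hap⟩
        · exact ⟨p, by rw [hform]; exact List.mem_cons_of_mem _ hp', hap⟩

theorem pvIntercalate_cons (c : Char) (p : List Char) (rest : List (List Char)) (h : rest ≠ []) :
    [c].intercalate (p :: rest) = p ++ c :: [c].intercalate rest := by
  cases rest with
  | nil => simp at h
  | cons q t => simp [List.intercalate, List.intersperse]

theorem pvIntercalate_split (parts : List (List Char)) (j : Nat) (h0 : 0 < j) (hj : j < parts.length) :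
    ['/'].intercalate parts
      = ['/'].intercalate (parts.take j) ++ '/' :: ['/'].intercalate (parts.drop j) := by
  induction parts generalizing j with
  | nil => simp at hj
  | cons p rest ih =>
    have hrest : rest ≠ [] := by
      rintro rfl
      simp at hj
      omega
    cases j with
    | zero => omega
    | succ j' =>
      rcases Nat.eq_zero_or_pos j' with rfl | hpos
      · rw [pvIntercalate_cons _ _ _ hrest]
        simp [List.intercalate]
      · have hj' : j' < rest.length := by simp at hj; omega
        have htake : rest.take j' ≠ [] := by
          intro h
          rcases List.take_eq_nil_iff.mp h with h' | h'
          · omega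
          · exact hrest h'
        rw [List.take_succ_cons, List.drop_succ_cons, pvIntercalate_cons _ _ _ hrest,
          pvIntercalate_cons _ _ _ htake, ih j' hpos hj']
        simp

-- wildcard-test bridges
theorem pvWildChar_iff (c : Char) : pvWildChar c = true ↔ (c = '*' ∨ c = '?' ∨ c = '[') := by
  unfold pvWildChar
  rw [PySem.Chars.isIn_iff_infix, List.singleton_infix_iff]
  simp

theorem pvHasWildA_iff (cs : List Char) :
    pvHasWildA cs = true ↔ ∃ c ∈ cs, (c = '*' ∨ c = '?' ∨ c = '[') := by
  unfold pvHasWildA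
  simp only [List.any_eq_true, List.mem_cons, List.not_mem_nil, or_false,
    PySem.Chars.isIn_iff_infix]
  constructor
  · rintro ⟨ch, h, hin⟩
    rcases h with rfl | rfl | rfl <;>
      · rw [List.singleton_infix_iff] at hin
        exact ⟨_, hin, by simp⟩
  · rintro ⟨c, hc, h⟩
    rcases h with rfl | rfl | rfl
    · exact ⟨['*'], by simp, List.singleton_infix_iff _ _ |>.mpr hc⟩
    · exact ⟨['?'], by simp, List.singleton_infix_iff _ _ |>.mpr hc⟩
    · exact ⟨['['], by simp, List.singleton_infix_iff _ _ |>.mpr hc⟩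

theorem pvHasWildA_eq_any (cs : List Char) : pvHasWildA cs = cs.any pvWildChar := by
  rw [Bool.eq_iff_iff, pvHasWildA_iff, List.any_eq_true]
  simp only [pvWildChar_iff]

-- scan lemmas
theorem pvScan_no_slash (p : List Char) : ∀ i cut, '/' ∉ p → pvScan p i cut = cut := by
  induction p with
  | nil => intro i cut _; rfl
  | cons c rest ih =>
    intro i cut h
    simp only [List.mem_cons, not_or] at h
    by_cases hw : pvWildChar c = true
    · simp [pvScan, hw]
    · simp only [pvScan, hw]
      rw [if_neg (Ne.symm h.1), ih _ _ h.2]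
      simp

theorem pvScan_wild_prefix (p : List Char) : ∀ t i cut, '/' ∉ p → pvHasWildA p = true →
    pvScan (p ++ t) i cut = cut := by
  induction p with
  | nil => intro t i cut _ hw; rw [pvHasWildA_iff] at hw; simp at hw
  | cons c rest ih =>
    intro t i cut hs hw
    simp only [List.mem_cons, not_or] at hs
    by_cases hwc : pvWildChar c = true
    · simp [pvScan, hwc]
    · have hb : pvWildChar c = false := by simpa using hwc
      have hw' : pvHasWildA rest = true := by
        rw [pvHasWildA_eq_any] at hw ⊢
        simpa [hb] using hw
      simp only [List.cons_append, pvScan, hb, Bool.false_eq_true, if_false]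
      rw [if_neg (Ne.symm hs.1), ih _ _ _ hs.2 hw']

theorem pvScan_skip_part (p : List Char) : ∀ t i cut, '/' ∉ p → pvHasWildA p = false →
    pvScan (p ++ '/' :: t) i cut = pvScan t (i + p.length + 1) (i + p.length) := by
  induction p with
  | nil =>
    intro t i cut _ _
    have h1 : pvWildChar '/' = false := by decide
    simp [pvScan, h1]
  | cons c rest ih =>
    intro t i cut hs hw
    simp only [List.mem_cons, not_or] at hs
    have hb : pvWildChar c = false := by
      rw [pvHasWildA_eq_any] at hw
      simp only [List.any_cons, Bool.or_eq_false_iff] at hw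
      exact hw.1
    have hw' : pvHasWildA rest = false := by
      rw [pvHasWildA_eq_any] at hw ⊢
      simp only [List.any_cons, Bool.or_eq_false_iff] at hw
      exact hw.2
    simp only [List.cons_append, pvScan, hb, Bool.false_eq_true, if_false]
    rw [if_neg (Ne.symm hs.1), ih _ _ _ hs.2 hw']
    have : (i + 1) + (rest.length : Int) + 1 = i + ((c :: rest).length : Int) + 1 := by
      simp; omega
    rw [this]
    have : (i + 1) + (rest.length : Int) = i + ((c :: rest).length : Int) := by
      simp; omega
    rw [this]

theorem pvScan_lb (t : List Char) : ∀ i cut, pvScan t i cut = cut ∨ i ≤ pvScan t i cut := by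
  induction t with
  | nil => intro i cut; exact Or.inl rfl
  | cons c t ih =>
    intro i cut
    by_cases hw : pvWildChar c = true
    · simp [pvScan, hw]
    · have hb : pvWildChar c = false := by simpa using hw
      simp only [pvScan, hb, Bool.false_eq_true, if_false]
      rcases ih (i + 1) (if c = '/' then i else cut) with h | h
      · by_cases hc : c = '/'
        · right; rw [h, if_pos hc]
        · left; rw [h, if_neg hc]
      · right; omega

theorem pvScan_shift (t : List Char) : ∀ i cut,
    pvScan t i cut = if pvScan t 0 (-1) = -1 then cut else i + pvScan t 0 (-1) := by
  induction t with
  | nil => intro i cut; simp [pvScan]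
  | cons c t ih =>
    intro i cut
    by_cases hw : pvWildChar c = true
    · simp [pvScan, hw]
    · have hb : pvWildChar c = false := by simpa using hw
      simp only [pvScan, hb, Bool.false_eq_true, if_false]
      rw [ih (i + 1) _, ih (0 + 1) _]
      rcases pvScan_lb t 0 (-1) with hr | hr
      · simp only [hr]
        by_cases hc : c = '/' <;> simp [hc]
      · have hne : pvScan t 0 (-1) ≠ -1 := by omega
        have hne2 : ¬(0 + 1 + pvScan t 0 (-1) = -1) := by omega
        simp only [if_neg hne]
        by_cases hc : c = '/' <;> simp <;> omega

-- first-wildcard-index lemmas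
theorem pvFirstWildLoop_shift (parts : List (List Char)) (hw : ∃ p ∈ parts, pvHasWildA p = true) :
    ∀ i, pvFirstWildLoop parts i = i + pvFirstWildLoop parts 0 := by
  induction parts with
  | nil => simp at hw
  | cons p rest ih =>
    intro i
    by_cases hp : pvHasWildA p = true
    · simp [pvFirstWildLoop, hp]
    · have hw' : ∃ q ∈ rest, pvHasWildA q = true := by
        rcases hw with ⟨q, hq, hqw⟩
        rcases List.mem_cons.mp hq with rfl | hq'
        · exact absurd hqw hp
        · exact ⟨q, hq', hqw⟩
      have hb : pvHasWildA p = false := by simpa using hp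
      simp only [pvFirstWildLoop, hb, Bool.false_eq_true, if_false]
      rw [ih hw' (i + 1), ih hw' (0 + 1)]
      omega

theorem pvFirstWildLoop_lt (parts : List (List Char)) (hw : ∃ p ∈ parts, pvHasWildA p = true) :
    pvFirstWildLoop parts 0 < parts.length := by
  induction parts with
  | nil => simp at hw
  | cons p rest ih =>
    by_cases hp : pvHasWildA p = true
    · simp [pvFirstWildLoop, hp]
    · have hw' : ∃ q ∈ rest, pvHasWildA q = true := by
        rcases hw with ⟨q, hq, hqw⟩
        rcases List.mem_cons.mp hq with rfl | hq'
        · exact absurd hqw hp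
        · exact ⟨q, hq', hqw⟩
      have hb : pvHasWildA p = false := by simpa using hp
      simp only [pvFirstWildLoop, hb, Bool.false_eq_true, if_false]
      rw [pvFirstWildLoop_shift rest hw' 1]
      have := ih hw'
      simp only [List.length_cons]
      omega

-- the central correspondence: the scan's cut is the length of the directory A joins
theorem pvScan_join (parts : List (List Char)) :
    parts ≠ [] → (∀ p ∈ parts, '/' ∉ p) → (∃ p ∈ parts, pvHasWildA p = true) →
    pvScan (['/'].intercalate parts) 0 (-1)
      = if pvFirstWildLoop parts 0 = 0 then -1
        else ((['/'].intercalate (parts.take (pvFirstWildLoop parts 0))).length : Int) := by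
  induction parts with
  | nil => intro h; exact absurd rfl h
  | cons p rest ih =>
    intro _ hsl hw
    have hslp : '/' ∉ p := hsl p List.mem_cons_self
    by_cases hp : pvHasWildA p = true
    · have hidx : pvFirstWildLoop (p :: rest) 0 = 0 := by simp [pvFirstWildLoop, hp]
      rw [hidx, if_pos rfl]
      cases rest with
      | nil =>
        have h1 : (['/'].intercalate [p]) = p := by simp [List.intercalate]
        rw [h1, pvScan_no_slash p 0 (-1) hslp]
      | cons q t =>
        rw [pvIntercalate_cons _ _ _ (by simp)]
        exact pvScan_wild_prefix p _ 0 (-1) hslp hp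
    · have hb : pvHasWildA p = false := by simpa using hp
      have hw' : ∃ q ∈ rest, pvHasWildA q = true := by
        rcases hw with ⟨q, hq, hqw⟩
        rcases List.mem_cons.mp hq with rfl | hq'
        · exact absurd hqw hp
        · exact ⟨q, hq', hqw⟩
      have hrest : rest ≠ [] := by
        rintro rfl
        rcases hw' with ⟨q, hq, _⟩
        simp at hq
      have hslr : ∀ q ∈ rest, '/' ∉ q := fun q hq => hsl q (List.mem_cons_of_mem _ hq)
      rw [pvIntercalate_cons _ _ _ hrest, pvScan_skip_part p _ 0 (-1) hslp hb, pvScan_shift]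
      have hrec := ih hrest hslr hw'
      have hidx : pvFirstWildLoop (p :: rest) 0 = 1 + pvFirstWildLoop rest 0 := by
        simp only [pvFirstWildLoop, hb, Bool.false_eq_true, if_false]
        rw [pvFirstWildLoop_shift rest hw' (0 + 1)]
      have hne0 : ¬(1 + pvFirstWildLoop rest 0 = 0) := by omega
      rw [hidx, if_neg hne0]
      by_cases hj0 : pvFirstWildLoop rest 0 = 0
      · rw [hj0, if_pos rfl] at hrec
        rw [hrec, if_pos rfl, hj0]
        simp [List.intercalate]
      · have hjpos : 0 < pvFirstWildLoop rest 0 := Nat.pos_of_ne_zero hj0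
        rw [if_neg hj0] at hrec
        rw [hrec]
        have hcast : ¬(((['/'].intercalate (rest.take (pvFirstWildLoop rest 0))).length : Int) = -1) := by
          omega
        rw [if_neg hcast]
        have htake : rest.take (pvFirstWildLoop rest 0) ≠ [] := by
          intro h
          rcases List.take_eq_nil_iff.mp h with h' | h'
          · omega
          · exact hrest h'
        have h1p : (1 : Nat) + pvFirstWildLoop rest 0 = pvFirstWildLoop rest 0 + 1 := by omega
        rw [h1p, List.take_succ_cons, pvIntercalate_cons _ _ _ htake]
        simp
        omega

-- ===== VERDICT (by name: the statement is the Claim_ definition above) =====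
theorem parse_watch_path_py_spec : Claim_equal_parse_watch_path_py := by
  intro path_pattern _
  unfold Spec_parse_watch_path_py
  unfold parse_watch_path_py parse_watch_path_py_alt
  simp only []
  by_cases hwild : pvHasWildA path_pattern.toList = true
  · have hany : path_pattern.toList.any pvWildChar = true := by
      rw [← pvHasWildA_eq_any]; exact hwild
    by_cases hsep : (PySem.Chars.isIn ['/'] path_pattern.toList
        || PySem.Chars.isIn ['\\'] path_pattern.toList) = true
    · -- main branch: wildcard and a separator
      have hnosep : (!(PySem.Chars.isIn ['/'] path_pattern.toList)
          && !(PySem.Chars.isIn ['\\'] path_pattern.toList)) = false := by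
        rw [← Bool.not_or, hsep]; rfl
      rw [if_pos hwild, if_pos hsep, hany, hnosep]
      simp only [Bool.not_true, Bool.false_eq_true, if_false]
      have hs : PySem.Chars.replace path_pattern.toList ['\\'] ['/']
          = path_pattern.toList.map pvNorm := pvReplace_eq path_pattern.toList
      rw [hs, pvSplitOn_eq '/' (path_pattern.toList.map pvNorm)]
      set s := path_pattern.toList.map pvNorm with hsdef
      set parts := List.splitOn '/' s with hparts
      have hne : parts ≠ [] := pvSplitOn_ne_nil '/' s
      have hsl : ∀ p ∈ parts, '/' ∉ p := pvNotMem_splitOn '/' s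
      have hic : ['/'].intercalate parts = s := List.intercalate_splitOn s '/'
      have hw : ∃ p ∈ parts, pvHasWildA p = true := by
        rw [pvHasWildA_iff] at hwild
        rcases hwild with ⟨c, hc, hcw⟩
        have hcs : c ∈ s := by
          rw [hsdef]
          refine List.mem_map.mpr ⟨c, hc, ?_⟩
          unfold pvNorm
          rcases hcw with rfl | rfl | rfl <;> rfl
        have hcslash : c ≠ '/' := by rcases hcw with rfl | rfl | rfl <;> decide
        obtain ⟨p, hp, hcp⟩ := pvMem_splitOn '/' c s hcs hcslash
        exact ⟨p, hp, (pvHasWildA_iff p).mpr ⟨c, hcp, hcw⟩⟩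
      have hscan := pvScan_join parts hne hsl hw
      rw [hic] at hscan
      have hjlt : pvFirstWildLoop parts 0 < parts.length := pvFirstWildLoop_lt parts hw
      by_cases hj0 : pvFirstWildLoop parts 0 = 0
      · rw [hj0, if_pos rfl] at hscan
        rw [hscan, if_pos rfl, hj0]
        simp only [Nat.lt_irrefl, if_false, List.drop_zero]
        have : PySem.Chars.join ['/'] parts = s := hic
        rw [this]
      · have hjpos : 0 < pvFirstWildLoop parts 0 := Nat.pos_of_ne_zero hj0
        rw [if_neg hj0] at hscan
        rw [hscan]
        have hcast : ¬(((['/'].intercalate (parts.take (pvFirstWildLoop parts 0))).length : Int) = -1) := by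
          omega
        rw [if_neg hcast, if_pos hjpos]
        have hsplit2 : s = ['/'].intercalate (parts.take (pvFirstWildLoop parts 0))
            ++ '/' :: ['/'].intercalate (parts.drop (pvFirstWildLoop parts 0)) := by
          rw [← hic]
          exact pvIntercalate_split parts _ hjpos hjlt
        set A := ['/'].intercalate (parts.take (pvFirstWildLoop parts 0)) with hA
        set B := ['/'].intercalate (parts.drop (pvFirstWildLoop parts 0)) with hB
        have htake : PySem.Chars.slice s none (some (A.length : Int)) = A := by
          rw [PySem.Chars.slice_eq_listSlice, PySem.List.slice_to s (by omega)]
          rw [hsplit2]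
          simp
        have hdrop : PySem.Chars.slice s (some ((A.length : Int) + 1)) none = B := by
          rw [PySem.Chars.slice_eq_listSlice, PySem.List.slice_from s (by omega)]
          have h1 : (((A.length : Int)) + 1).toNat = A.length + 1 := by omega
          rw [h1, hsplit2]
          have h2 : A ++ '/' :: B = (A ++ ['/']) ++ B := by simp
          rw [h2]
          have h3 : A.length + 1 = (A ++ ['/']).length := by simp
          rw [h3, List.drop_left]
        rw [htake, hdrop]
        have hjoinA : PySem.Chars.join ['/'] (parts.take (pvFirstWildLoop parts 0)) = A := rfl
        have hjoinB : PySem.Chars.join ['/'] (parts.drop (pvFirstWildLoop parts 0)) = B := rfl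
        rw [hjoinA, hjoinB]
    · -- wildcard but no separator
      have hnosep : (!(PySem.Chars.isIn ['/'] path_pattern.toList)
          && !(PySem.Chars.isIn ['\\'] path_pattern.toList)) = true := by
        rw [← Bool.not_or]
        simp only [Bool.not_eq_true] at hsep
        rw [hsep]; rfl
      rw [if_pos hwild, if_neg (by simp [hsep]), hany, hnosep]
      simp
  · -- no wildcard
    have hb : pvHasWildA path_pattern.toList = false := by simpa using hwild
    have hany : path_pattern.toList.any pvWildChar = false := by
      rw [← pvHasWildA_eq_any]; exact hb
    rw [if_neg (by simp [hb]), hany]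
    simp
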